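-- pv_equiv track=rewrite | github.com/melisacakmaak/Web-Scraping | webScraping/app.py | sem_cikar
-- ===== SOURCE A (Python) =====
-- def sem_cikar(allWords):# kelimelerde ki sembolleri çikarma fonk.
--     cikarilanKelimeler = []#sembollerden arındırılmış kelimeler için dizi
--     cikarilacakSembollr = chr(775) + "–!'^+%&/()<>£#$½-*@.,:;→=_↵©️·"
--     for Kelime in allWords:
--         for sem in cikarilacakSembollr:
--             if sem in Kelime:# sembol kelimenin içindeyse sembolu kelimeden cikart
--                 Kelime = Kelime.replace(sem, "")
--         if (len(Kelime) > 0):# son haliyle uzunluğu 0 dan buyukse cikarilan kelimelere ekle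
--             cikarilanKelimeler.append(Kelime)
--     return cikarilanKelimeler
-- ===== SOURCE B (Python) =====
-- def sem_cikar(allWords):
--     semboller = set(chr(775) + "–!'^+%&/()<>£#$½-*@.,:;→=_↵©️·")
--     temiz = ["".join(ch for ch in Kelime if ch not in semboller) for Kelime in allWords]
--     return [Kelime for Kelime in temiz if Kelime]
-- ===== Notes on version B (the rewrite author's own statement) =====
-- stated objective: idiomatic
-- what changed: The inner loop over the 31 symbols with repeated str.replace passes is replaced by a single per-character filter pass per word against a precomputed symbol set; empties are then dropped by a comprehension.
import Mathlib
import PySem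

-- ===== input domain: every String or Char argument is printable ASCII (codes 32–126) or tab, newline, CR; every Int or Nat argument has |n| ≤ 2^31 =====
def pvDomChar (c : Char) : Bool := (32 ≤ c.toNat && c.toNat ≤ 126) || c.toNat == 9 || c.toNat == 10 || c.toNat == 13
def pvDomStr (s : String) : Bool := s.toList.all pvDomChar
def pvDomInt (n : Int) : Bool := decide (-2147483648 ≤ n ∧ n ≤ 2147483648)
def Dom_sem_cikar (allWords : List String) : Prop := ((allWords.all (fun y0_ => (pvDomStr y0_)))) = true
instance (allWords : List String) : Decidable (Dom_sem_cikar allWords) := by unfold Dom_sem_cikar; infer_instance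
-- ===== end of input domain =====

-- B replaces A's inner loop over the 31 symbols (with a str.replace pass per symbol) by a single
-- per-character filter pass against the symbol set, built once; same return value on every input.

-- ===== PORT A =====
-- the symbol string chr(775) + "–!'^+%&/()<>£#$½-*@.,:;→=_↵©️·" (chr(775) = U+0307; "©️" is U+00A9 U+FE0F)
def pvCikarilacakSembollr : String := "\u0307\u2013!'^+%&/()<>\u00a3#$\u00bd-*@.,:;\u2192=_\u21b5\u00a9\ufe0f\u00b7"

-- the body of A's inner loop: if sem in Kelime: Kelime = Kelime.replace(sem, "")
def pvStepA (Kelime : String) (sem : Char) : String :=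
  if PySem.Str.isIn (String.ofList [sem]) Kelime then PySem.Str.replace Kelime (String.ofList [sem]) "" else Kelime

-- if len(Kelime) > 0: cikarilanKelimeler.append(Kelime)
def pvAppendIf (cikarilanKelimeler : List String) (Kelime : String) : List String :=
  if 0 < PySem.Str.len Kelime then cikarilanKelimeler ++ [Kelime] else cikarilanKelimeler

def sem_cikar (allWords : List String) : List String :=
  allWords.foldl
    (fun cikarilanKelimeler Kelime =>
      pvAppendIf cikarilanKelimeler (pvCikarilacakSembollr.toList.foldl pvStepA Kelime))
    []

-- ===== PORT B =====
-- semboller = set(chr(775) + "–!'^+%&/()<>£#$½-*@.,:;→=_↵©️·")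
def pvSemboller : PySem.Set Char := PySem.Set.ofList ("\u0307\u2013!'^+%&/()<>\u00a3#$\u00bd-*@.,:;\u2192=_\u21b5\u00a9\ufe0f\u00b7" : String).toList

def sem_cikar_alt (allWords : List String) : List String :=
  let temiz := allWords.map
    (fun Kelime => String.ofList (Kelime.toList.filter (fun ch => !(pvSemboller.contains ch))))
  temiz.filter (fun Kelime => !(Kelime == ""))

-- ===== PRECONDITION & SPEC =====
def Spec_sem_cikar (allWords : List String) (out : List String) : Prop := out = sem_cikar_alt allWords
instance (allWords : List String) (out : List String) : Decidable (Spec_sem_cikar allWords out) := by unfold Spec_sem_cikar; infer_instance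

-- ===== CLAIM (what is proved, stated in full; the proofs are below) =====
def Claim_equal_sem_cikar : Prop := ∀ (allWords : List String), Dom_sem_cikar allWords → Spec_sem_cikar allWords (sem_cikar allWords)

-- ===== LEMMAS AND PROOFS =====

-- replace.go with a single-char pattern and empty replacement is a filter
theorem pv_go_single (c : Char) : ∀ (fuel : Nat) (l acc : List Char), l.length ≤ fuel →
    PySem.Chars.replace.go [c] [] fuel l acc = acc.reverse ++ l.filter (fun x => !(x == c)) := by
  intro fuel
  induction fuel with
  | zero =>
    intro l acc h
    have : l = [] := List.eq_nil_of_length_eq_zero (Nat.le_zero.mp h)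
    subst this; simp [PySem.Chars.replace.go]
  | succ n ih =>
    intro l acc h
    cases l with
    | nil => simp [PySem.Chars.replace.go]
    | cons x t =>
      by_cases hx : x = c
      · subst hx
        have hpre : [x].isPrefixOf (x :: t) = true := by simp
        simp only [PySem.Chars.replace.go, hpre, if_pos, List.length_cons, List.length_nil,
          Nat.zero_add, List.drop_succ_cons, List.drop_zero, List.reverse_nil, List.nil_append]
        rw [ih t acc (by simpa using h)]
        simp
      · have hpre : [c].isPrefixOf (x :: t) = false := by
          simp [List.isPrefixOf]; exact fun he => (hx he.symm).elim
        simp only [PySem.Chars.replace.go, hpre]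
        rw [if_neg (by simp), ih t (x :: acc) (by simpa using h)]
        simp [hx]

theorem pv_replace_single (c : Char) (w : List Char) :
    PySem.Chars.replace w [c] [] = w.filter (fun x => !(x == c)) := by
  have := pv_go_single c w.length w [] (Nat.le_refl _)
  simpa [PySem.Chars.replace] using this

theorem pv_isIn_single (c : Char) (w : List Char) :
    PySem.Chars.isIn [c] w = true ↔ c ∈ w := by
  rw [PySem.Chars.isIn_iff_infix]
  constructor
  · intro h; exact h.mem (by simp)
  · intro h
    obtain ⟨a, b, rfl⟩ := List.append_of_mem h
    exact ⟨a, b, by simp⟩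

-- the char-level shadow of A's inner-loop body
def pvStepC (w : List Char) (sem : Char) : List Char :=
  if PySem.Chars.isIn [sem] w then PySem.Chars.replace w [sem] [] else w

theorem pv_stepA_toList (w : String) (sem : Char) :
    (pvStepA w sem).toList = pvStepC w.toList sem := by
  unfold pvStepA pvStepC
  rw [PySem.Str.isIn_eq]
  simp only [String.toList_ofList]
  split
  · rw [PySem.Str.toList_replace]
    simp
  · rfl

theorem pv_innerC (syms : List Char) : ∀ (w : List Char),
    syms.foldl pvStepC w = w.filter (fun ch => !(syms.contains ch)) := by
  induction syms with
  | nil => intro w; simp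
  | cons s rest ih =>
    intro w
    have hstep : pvStepC w s = w.filter (fun x => !(x == s)) := by
      unfold pvStepC
      split
      · exact pv_replace_single s w
      · rename_i hni
        refine (List.filter_eq_self.mpr ?_).symm
        intro x hx
        simp only [Bool.not_eq_eq_eq_not, Bool.not_true, beq_eq_false_iff_ne]
        intro he; subst he
        exact hni ((pv_isIn_single x w).mpr hx)
    rw [List.foldl_cons, hstep, ih, List.filter_filter]
    apply List.filter_congr
    intro x _
    by_cases hx : x = s <;> simp [hx]

theorem pv_innerA_toList (syms : List Char) (w : String) :
    (syms.foldl pvStepA w).toList = w.toList.filter (fun ch => !(syms.contains ch)) := by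
  have key : ∀ (ss : List Char) (w : String), (ss.foldl pvStepA w).toList = ss.foldl pvStepC w.toList := by
    intro ss
    induction ss with
    | nil => intro w; rfl
    | cons s rest ih => intro w; rw [List.foldl_cons, List.foldl_cons, ih, pv_stepA_toList]
  rw [key, pv_innerC]

-- B's per-word cleaner
def pvClean (Kelime : String) : String :=
  String.ofList (Kelime.toList.filter (fun ch => !(pvSemboller.contains ch)))

theorem pv_contains_pvSemboller (ch : Char) :
    pvSemboller.contains ch = pvCikarilacakSembollr.toList.contains ch := by
  unfold pvSemboller pvCikarilacakSembollr
  rw [Bool.eq_iff_iff, PySem.Set.contains_iff, List.contains_iff_mem]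
  exact PySem.Set.mem_ofList _ ch

theorem pv_word_eq (w : String) : pvCikarilacakSembollr.toList.foldl pvStepA w = pvClean w := by
  apply String.ext
  rw [pv_innerA_toList, pvClean, String.toList_ofList]
  exact List.filter_congr (fun x _ => by rw [pv_contains_pvSemboller])

theorem pv_cond (w : String) :
    (0 < PySem.Str.len (pvClean w)) ↔ ((!(pvClean w == "")) = true) := by
  rw [PySem.Str.len_eq, Bool.not_eq_eq_eq_not, Bool.not_true, beq_eq_false_iff_ne]
  constructor
  · intro h he
    rw [he] at h; simp at h
  · intro h
    have hne : (pvClean w).toList ≠ [] := fun he => h (String.ext (by simp [he]))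
    exact_mod_cast List.length_pos_of_ne_nil hne

theorem pv_outer (ws : List String) : ∀ (acc : List String),
    ws.foldl
      (fun cikarilanKelimeler Kelime =>
        pvAppendIf cikarilanKelimeler (pvCikarilacakSembollr.toList.foldl pvStepA Kelime))
      acc
    = acc ++ (ws.map pvClean).filter (fun Kelime => !(Kelime == "")) := by
  induction ws with
  | nil => intro acc; simp
  | cons w rest ih =>
    intro acc
    rw [List.foldl_cons, ih, pv_word_eq, List.map_cons, List.filter_cons]
    unfold pvAppendIf
    by_cases hc : 0 < PySem.Str.len (pvClean w)
    · rw [if_pos hc, (pv_cond w).mp hc]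
      simp
    · rw [if_neg hc]
      have hfalse : (!(pvClean w == "")) = false := by
        cases hb : (!(pvClean w == "")) with
        | false => rfl
        | true => exact absurd ((pv_cond w).mpr hb) hc
      rw [hfalse]
      simp

-- ===== VERDICT (by name: the statement is the Claim_ definition above) =====
theorem sem_cikar_spec : Claim_equal_sem_cikar := by
  intro allWords _
  show sem_cikar allWords = sem_cikar_alt allWords
  rw [sem_cikar, sem_cikar_alt, pv_outer]
  rfl
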